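-- pv_equiv track=rewrite | github.com/Goodly/DW_ML | uguryi-custom-ner-tagger-6c383ac66981/df-classifier.py | gen_lst_untagged
-- ===== SOURCE A (Python) =====
-- def gen_lst_untagged(tag_positions_better, text):
--     lst_untagged_text = []
--     p0 = 0
--     for p in tag_positions_better:
--         #lst_untagged_text += [['Untagged', p0, p[0]-1, text[p0:p[0]]]]
--         lst_untagged_text += [['O', p0, p[0]-1, text[p0:p[0]]]]
--         p0 = p[1] + 1
--     lst_untagged_text = [e for e in lst_untagged_text]
--     return(lst_untagged_text)
-- ===== SOURCE B (Python) =====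
-- def gen_lst_untagged(tag_positions_better, text):
--     def segments(start, positions):
--         if not positions:
--             return []
--         first = positions[0]
--         seg = ['O', start, first[0] - 1, text[start:first[0]]]
--         return [seg] + segments(first[1] + 1, positions[1:])
--     return segments(0, list(tag_positions_better))
-- ===== Notes on version B (the rewrite author's own statement) =====
-- stated objective: alternative
-- what changed: Replaces A's imperative loop threading a mutable p0 accumulator (plus A's redundant trailing identity copy) by a structural recursion on the position list that passes the next segment start as a parameter and builds the result front-to-back by consing.
import Mathlib
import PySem

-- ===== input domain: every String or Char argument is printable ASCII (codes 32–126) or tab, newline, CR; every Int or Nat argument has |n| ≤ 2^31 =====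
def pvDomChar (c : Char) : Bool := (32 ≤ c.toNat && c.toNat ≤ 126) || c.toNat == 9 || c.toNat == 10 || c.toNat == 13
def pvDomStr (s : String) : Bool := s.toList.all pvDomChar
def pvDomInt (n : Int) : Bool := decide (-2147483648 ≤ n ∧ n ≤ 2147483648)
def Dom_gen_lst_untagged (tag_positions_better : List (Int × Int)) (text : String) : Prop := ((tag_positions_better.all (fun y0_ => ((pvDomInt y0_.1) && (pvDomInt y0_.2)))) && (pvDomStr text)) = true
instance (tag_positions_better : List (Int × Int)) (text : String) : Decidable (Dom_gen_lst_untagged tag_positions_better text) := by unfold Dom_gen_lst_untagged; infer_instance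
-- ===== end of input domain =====

-- B replaces A's imperative loop threading a mutable p0 accumulator (and its trailing
-- identity copy) by a structural recursion passing the next start as a parameter (objective: alternative).

-- ===== PORT A =====
-- loop with state (lst_untagged_text, p0); at the end the identity comprehension [e for e in lst]
def gen_lst_untagged (tag_positions_better : List (Int × Int)) (text : String) :
    List (String × Int × Int × String) :=
  let st := tag_positions_better.foldl
    (fun (st : List (String × Int × Int × String) × Int) p =>
      (st.1 ++ [("O", st.2, p.1 - 1, PySem.Str.slice text (some st.2) (some p.1))], p.2 + 1))
    ([], 0)
  st.1.map (fun e => e)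

-- ===== PORT B =====
-- the inner recursive helper 'segments' of Source B
def pvSegments (text : String) (start : Int) :
    List (Int × Int) → List (String × Int × Int × String)
  | [] => []
  | first :: rest =>
      ("O", start, first.1 - 1, PySem.Str.slice text (some start) (some first.1))
        :: pvSegments text (first.2 + 1) rest

def gen_lst_untagged_alt (tag_positions_better : List (Int × Int)) (text : String) :
    List (String × Int × Int × String) :=
  pvSegments text 0 tag_positions_better

-- ===== PRECONDITION & SPEC =====
def Spec_gen_lst_untagged (tag_positions_better : List (Int × Int)) (text : String) (out : List (String × Int × Int × String)) : Prop := out = gen_lst_untagged_alt tag_positions_better text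
instance (tag_positions_better : List (Int × Int)) (text : String) (out : List (String × Int × Int × String)) : Decidable (Spec_gen_lst_untagged tag_positions_better text out) := by unfold Spec_gen_lst_untagged; infer_instance

-- ===== CLAIM (what is proved, stated in full; the proofs are below) =====
def Claim_equal_gen_lst_untagged : Prop := ∀ (tag_positions_better : List (Int × Int)) (text : String), Dom_gen_lst_untagged tag_positions_better text → Spec_gen_lst_untagged tag_positions_better text (gen_lst_untagged tag_positions_better text)

-- ===== LEMMAS AND PROOFS =====

-- loop invariant: A's fold from an arbitrary accumulator and pending start p0
-- equals the accumulator followed by B's recursion started at p0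
theorem gen_lst_untagged_fold_eq (text : String) :
    ∀ (tps : List (Int × Int)) (acc : List (String × Int × Int × String)) (p0 : Int),
      (tps.foldl
        (fun (st : List (String × Int × Int × String) × Int) p =>
          (st.1 ++ [("O", st.2, p.1 - 1, PySem.Str.slice text (some st.2) (some p.1))], p.2 + 1))
        (acc, p0)).1
      = acc ++ pvSegments text p0 tps := by
  intro tps
  induction tps with
  | nil => simp [pvSegments]
  | cons p rest ih =>
    intro acc p0
    simp [List.foldl_cons, ih, pvSegments]

-- ===== VERDICT (by name: the statement is the Claim_ definition above) =====
theorem gen_lst_untagged_spec : Claim_equal_gen_lst_untagged := by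
  intro tps text _
  show gen_lst_untagged tps text = gen_lst_untagged_alt tps text
  simp [gen_lst_untagged, gen_lst_untagged_alt, gen_lst_untagged_fold_eq]
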